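-- pv_equiv track=rewrite | github.com/vvvv1111vvvv/python-algorithm | code-test-practices/ExhaustiveSearch_ans_Simulation/연구소_백준14502.py | spread_virous
-- ===== SOURCE A (Python) =====
-- def spread_virous(data):
--     virous_point=[]
--     for row in range(len(data)):
--         for column in range(len(data[0])):
--             if data[row][column]==2:
--                 virous_point.append([row,column])
--     while virous_point:
--         dx=[0,1,0,-1]
--         dy=[1,0,-1,0]
--         v_point=virous_point.pop()
--         for i in range(4):
--             nx=v_point[0]+dx[i]
--             ny=v_point[1]+dy[i]
--             if nx<0 or ny<0 or nx>=len(data) or ny>=len(data[0]):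
--                 continue
--             elif data[nx][ny]==0:
--                 data[nx][ny]=2
--                 virous_point.append([nx,ny])
--     return check_safe_square_count(data)
--
-- def check_safe_square_count(data):
--     result=0
--     for row in range(len(data)):
--         for column in range(len(data[0])):
--             if data[row][column]==0:
--                 result+=1
--     return result
-- ===== SOURCE B (Python) =====
-- # Round-based saturation over an immutable infected set (A flood-fills with a stack
-- # and mutates `data` in place; B leaves `data` unmutated -- return-value equivalence only).
-- def spread_virous(data):
--     h = len(data)
--     w = len(data[0]) if data else 0
--     infected = {(r, c) for r in range(h) for c in range(w) if data[r][c] == 2}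
--     while True:
--         frontier = {(r, c) for r in range(h) for c in range(w)
--                     if data[r][c] == 0 and (r, c) not in infected
--                     and ((r - 1, c) in infected or (r + 1, c) in infected
--                          or (r, c - 1) in infected or (r, c + 1) in infected)}
--         if not frontier:
--             break
--         infected |= frontier
--     return sum(1 for r in range(h) for c in range(w)
--                if data[r][c] == 0 and (r, c) not in infected)
-- ===== Notes on version B (the rewrite author's own statement) =====
-- stated objective: alternative
-- what changed: Replaces the mutating stack-based flood fill with a round-based saturation: an immutable infected set is grown to a fixpoint by repeatedly adding every empty cell adjacent to it, then the safe cells are counted directly (B does not mutate data).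
import Mathlib
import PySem

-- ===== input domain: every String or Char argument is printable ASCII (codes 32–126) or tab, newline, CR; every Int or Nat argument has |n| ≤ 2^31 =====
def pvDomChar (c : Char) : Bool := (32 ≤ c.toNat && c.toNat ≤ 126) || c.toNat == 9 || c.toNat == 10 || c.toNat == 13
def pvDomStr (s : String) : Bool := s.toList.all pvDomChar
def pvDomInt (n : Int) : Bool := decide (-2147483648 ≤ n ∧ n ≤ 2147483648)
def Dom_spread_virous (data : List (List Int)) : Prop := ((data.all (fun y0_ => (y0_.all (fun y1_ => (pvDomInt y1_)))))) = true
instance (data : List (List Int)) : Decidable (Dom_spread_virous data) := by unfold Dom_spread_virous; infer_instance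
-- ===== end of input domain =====

-- B replaces A's mutating stack flood fill by a round-based saturation of an immutable
-- infected set (fixpoint iteration); A mutates `data` in place, B does not — the
-- equivalence proved here is about the return value only.

-- ===== PORT A =====
-- data[x][y]: every access A performs is in range under Pre_; the default 2 is returned
-- only on reads A never performs there (out-of-range column in a ragged row).
def cellA (g : List (List Int)) (x y : Int) : Int :=
  ((PySem.List.pyGet? g x).bind fun row => PySem.List.pyGet? row y).getD 2

-- data[x][y] = v (A only writes at indices validated by its bound checks)
def setA (g : List (List Int)) (x y : Int) (v : Int) : List (List Int) :=
  PySem.List.pySetD g x (PySem.List.pySetD (PySem.List.pyGetD g x []) y v)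

-- the i-th pair (dx[i], dy[i]) of A's parallel lists dx, dy
def dirsA : List (Int × Int) := [(0, 1), (1, 0), (0, -1), (-1, 0)]

-- the initial scan collecting virous_point
def sourcesA (data : List (List Int)) : List (Int × Int) :=
  (PySem.List.pyRange 0 (data.length : Int) 1).foldl (fun acc r =>
    (PySem.List.pyRange 0 ((data.headD []).length : Int) 1).foldl (fun acc c =>
      if cellA data r c = 2 then acc ++ [(r, c)] else acc) acc) []

-- termination measure helper for the while loop (number of 0 entries)
def zerosA (g : List (List Int)) : Nat := (g.map (fun row => row.countP (fun a => a == 0))).sum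

-- one iteration i of A's inner `for i in range(4)` loop
def stepA (v : Int × Int) (s : List (List Int) × List (Int × Int)) (d : Int × Int) :
    List (List Int) × List (Int × Int) :=
  if v.1 + d.1 < 0 ∨ v.2 + d.2 < 0 ∨ v.1 + d.1 ≥ (s.1.length : Int) ∨
      v.2 + d.2 ≥ ((s.1.headD []).length : Int) then s
  else if cellA s.1 (v.1 + d.1) (v.2 + d.2) = 0 then
    (setA s.1 (v.1 + d.1) (v.2 + d.2) 2, s.2 ++ [(v.1 + d.1, v.2 + d.2)])
  else s

theorem sum_set_lt {l : List Nat} {i : Nat} {x : Nat} (hi : i < l.length) (hx : x < l[i]) :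
    (l.set i x).sum < l.sum := by
  induction l generalizing i with
  | nil => simp at hi
  | cons a t ih =>
    cases i with
    | zero => simp at hx ⊢; omega
    | succ n =>
      simp only [List.set_cons_succ, List.sum_cons]
      have := ih (i := n) (by simpa using hi) (by simpa using hx)
      omega

theorem countP_set_two_lt {row : List Int} {j : Nat} (hj : j < row.length) (h0 : row[j] = 0) :
    (row.set j 2).countP (fun a => a == 0) < row.countP (fun a => a == 0) := by
  induction row generalizing j with
  | nil => simp at hj
  | cons a t ih =>
    cases j with
    | zero =>
      simp only [List.getElem_cons_zero] at h0
      subst h0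
      simp
    | succ n =>
      simp only [List.getElem_cons_succ] at h0
      have := ih (j := n) (by simpa using hj) h0
      simp only [List.set_cons_succ, List.countP_cons]
      omega

theorem zerosA_set_lt {g : List (List Int)} {i j : Nat} (hi : i < g.length)
    (hj : j < g[i].length) (h0 : g[i][j] = 0) :
    zerosA (g.set i (g[i].set j 2)) < zerosA g := by
  unfold zerosA
  rw [List.map_set]
  exact sum_set_lt (by simpa using hi)
    (by simpa using countP_set_two_lt hj h0)

-- extract concrete bounds from a successful 0-read
theorem cellA_zero_elim {g : List (List Int)} {x y : Int} (hx : 0 ≤ x) (hy : 0 ≤ y)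
    (h : cellA g x y = 0) :
    ∃ (hi : x.toNat < g.length) (hj : y.toNat < g[x.toNat].length),
      g[x.toNat][y.toNat] = 0 ∧ setA g x y 2 = g.set x.toNat (g[x.toNat].set y.toNat 2) := by
  unfold cellA at h
  rcases ho : PySem.List.pyGet? g x with _ | row
  · rw [ho] at h; simp at h
  rw [ho] at h
  simp only [Option.bind_some] at h
  rcases ho2 : PySem.List.pyGet? row y with _ | c
  · rw [ho2] at h; simp at h
  rw [ho2] at h
  simp at h
  subst h
  rw [PySem.List.pyGet?_of_nonneg g hx] at ho
  rw [PySem.List.pyGet?_of_nonneg row hy] at ho2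
  obtain ⟨hi, hrow⟩ := List.getElem?_eq_some_iff.mp ho
  subst hrow
  obtain ⟨hj, hval⟩ := List.getElem?_eq_some_iff.mp ho2
  refine ⟨hi, hj, hval, ?_⟩
  unfold setA
  rw [PySem.List.pySetD_of_nonneg _ _ hx]
  have hgd : PySem.List.pyGetD g x [] = g[x.toNat] :=
    PySem.List.pyGetD_eq_getElem g [] hx (by omega)
  rw [hgd, PySem.List.pySetD_of_nonneg _ _ hy]

theorem stepA_measure (v d : Int × Int) (s : List (List Int) × List (Int × Int)) :
    2 * zerosA (stepA v s d).1 + (stepA v s d).2.length ≤ 2 * zerosA s.1 + s.2.length := by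
  unfold stepA
  split_ifs with h1 h2
  · exact le_refl _
  · rw [not_or, not_or, not_or] at h1
    simp only [not_lt] at h1
    obtain ⟨hx, hy, _, _⟩ := h1
    obtain ⟨hi, hj, h0, hset⟩ := cellA_zero_elim hx hy h2
    have hlt := zerosA_set_lt hi hj h0
    rw [hset] at *
    simp only [List.length_append, List.length_cons, List.length_nil]
    omega
  · exact le_refl _

theorem foldA_measure (v : Int × Int) (ds : List (Int × Int))
    (s : List (List Int) × List (Int × Int)) :
    2 * zerosA (ds.foldl (stepA v) s).1 + ((ds.foldl (stepA v) s).2).length ≤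
      2 * zerosA s.1 + s.2.length := by
  induction ds generalizing s with
  | nil => exact le_refl _
  | cons d ds ih =>
    calc 2 * zerosA ((d :: ds).foldl (stepA v) s).1 + ((d :: ds).foldl (stepA v) s).2.length
        = 2 * zerosA (ds.foldl (stepA v) (stepA v s d)).1 +
            (ds.foldl (stepA v) (stepA v s d)).2.length := rfl
      _ ≤ 2 * zerosA (stepA v s d).1 + (stepA v s d).2.length := ih _
      _ ≤ 2 * zerosA s.1 + s.2.length := stepA_measure v d s

-- A's `while virous_point:` loop; pop() takes the LAST element
def loopA : List (List Int) → List (Int × Int) → List (List Int)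
  | g, [] => g
  | g, p :: tl =>
    loopA (List.foldl (stepA ((p :: tl).getLast (List.cons_ne_nil p tl))) (g, (p :: tl).dropLast) dirsA).1
          (List.foldl (stepA ((p :: tl).getLast (List.cons_ne_nil p tl))) (g, (p :: tl).dropLast) dirsA).2
termination_by g st => 2 * zerosA g + st.length
decreasing_by
  have h := foldA_measure ((p :: tl).getLast (List.cons_ne_nil p tl)) dirsA (g, (p :: tl).dropLast)
  simp only [List.length_dropLast, List.length_cons] at h ⊢
  omega

def checkSafeA (data : List (List Int)) : Int :=
  (PySem.List.pyRange 0 (data.length : Int) 1).foldl (fun res r =>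
    (PySem.List.pyRange 0 ((data.headD []).length : Int) 1).foldl (fun res c =>
      if cellA data r c = 0 then res + 1 else res) res) 0

def spread_virous (data : List (List Int)) : Int :=
  checkSafeA (loopA data (sourcesA data))

-- ===== PORT B =====
def cellB (data : List (List Int)) (p : Int × Int) : Int :=
  ((PySem.List.pyGet? data p.1).bind fun row => PySem.List.pyGet? row p.2).getD 2

-- the cells enumerated by `for r in range(h) for c in range(w)`
def gridCellsB (h w : Int) : List (Int × Int) :=
  (PySem.List.pyRange 0 h 1).flatMap (fun r => (PySem.List.pyRange 0 w 1).map (fun c => (r, c)))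

def sourcesB (data : List (List Int)) (h w : Int) : PySem.Set (Int × Int) :=
  PySem.Set.ofList ((gridCellsB h w).filter (fun p => cellB data p == 2))

def frontierB (data : List (List Int)) (h w : Int) (infected : PySem.Set (Int × Int)) :
    PySem.Set (Int × Int) :=
  PySem.Set.ofList ((gridCellsB h w).filter (fun p =>
    cellB data p == 0 && !(PySem.Set.contains infected p) &&
      (PySem.Set.contains infected (p.1 - 1, p.2) || PySem.Set.contains infected (p.1 + 1, p.2) ||
       PySem.Set.contains infected (p.1, p.2 - 1) || PySem.Set.contains infected (p.1, p.2 + 1))))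

-- termination measure helper: uninfected empty cells remaining
def measB (data : List (List Int)) (h w : Int) (infected : PySem.Set (Int × Int)) : Nat :=
  (gridCellsB h w).countP (fun p => cellB data p == 0 && !(PySem.Set.contains infected p))

theorem countP_lt_of_imp_of_witness {α : Type} {l : List α} {p q : α → Bool}
    (himp : ∀ x ∈ l, p x = true → q x = true) (x : α) (hx : x ∈ l) (hqx : q x = true)
    (hpx : p x = false) : l.countP p < l.countP q := by
  induction l with
  | nil => simp at hx
  | cons a t ih =>
    rcases List.mem_cons.mp hx with hx | hx
    · subst hx
      have hle : t.countP p ≤ t.countP q :=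
        List.countP_mono_left (fun y hy => himp y (List.mem_cons_of_mem _ hy))
      simp [hqx, hpx]
      omega
    · have := ih (fun y hy => himp y (List.mem_cons_of_mem _ hy)) hx
      simp only [List.countP_cons]
      by_cases hpa : p a = true
      · have hqa : q a = true := himp a (List.mem_cons_self) hpa
        simp [hpa, hqa]; omega
      · simp only [Bool.not_eq_true] at hpa
        simp [hpa]
        split <;> omega

theorem loopB_dec (data : List (List Int)) (h w : Int) (inf : PySem.Set (Int × Int))
    (hf : frontierB data h w inf ≠ []) :
    measB data h w (PySem.Set.union inf (frontierB data h w inf)) < measB data h w inf := by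
  obtain ⟨x, hx⟩ : ∃ x, x ∈ frontierB data h w inf := by
    cases hh : frontierB data h w inf with
    | nil => exact absurd hh hf
    | cons a t => exact ⟨a, by simp⟩
  obtain ⟨hxg, hxc⟩ := List.mem_filter.mp ((PySem.Set.mem_ofList _ _).mp hx)
  simp only [Bool.and_eq_true, Bool.not_eq_true', beq_iff_eq] at hxc
  have hxcontains : PySem.Set.contains (PySem.Set.union inf (frontierB data h w inf)) x = true :=
    (PySem.Set.contains_iff _ _).mpr ((PySem.Set.mem_union _ _ _).mpr (Or.inr hx))
  unfold measB
  apply countP_lt_of_imp_of_witness _ x hxg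
  · -- q x = true
    simp only [Bool.and_eq_true, Bool.not_eq_true', beq_iff_eq]
    exact ⟨hxc.1.1, hxc.1.2⟩
  · -- p x = false
    simp only [hxcontains, Bool.not_true, Bool.and_false]
  · -- pointwise implication
    intro y hy hpy
    simp only [Bool.and_eq_true, Bool.not_eq_true', beq_iff_eq] at hpy ⊢
    obtain ⟨h1, h2⟩ := hpy
    refine ⟨h1, ?_⟩
    have hnu : y ∉ PySem.Set.union inf (frontierB data h w inf) := by
      intro hm
      rw [(PySem.Set.contains_iff _ _).mpr hm] at h2
      cases h2
    by_contra hc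
    rw [Bool.not_eq_false] at hc
    exact hnu ((PySem.Set.mem_union _ _ _).mpr (Or.inl ((PySem.Set.contains_iff _ _).mp hc)))

-- B's `while True:` saturation loop
def loopB (data : List (List Int)) (h w : Int) (infected : PySem.Set (Int × Int)) :
    PySem.Set (Int × Int) :=
  if _hf : frontierB data h w infected = [] then infected
  else loopB data h w (PySem.Set.union infected (frontierB data h w infected))
termination_by measB data h w infected
decreasing_by exact loopB_dec data h w infected _hf

def spread_virous_alt (data : List (List Int)) : Int :=
  (gridCellsB (data.length : Int) (if data = [] then 0 else ((data.headD []).length : Int))).foldl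
    (fun acc p =>
      if cellB data p == 0 &&
          !(PySem.Set.contains
              (loopB data (data.length : Int)
                (if data = [] then 0 else ((data.headD []).length : Int))
                (sourcesB data (data.length : Int)
                  (if data = [] then 0 else ((data.headD []).length : Int)))) p) then
        acc + 1
      else acc) 0

-- ===== PRECONDITION & SPEC =====
-- Pre_ excludes exactly the ragged grids on which Python A raises IndexError: some row
-- shorter than the first row (every column index 0..len(data[0])-1 is read in every row).
def Pre_spread_virous (data : List (List Int)) : Prop :=
  ∀ row ∈ data, (data.headD []).length ≤ row.length
instance (data : List (List Int)) : Decidable (Pre_spread_virous data) := by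
  unfold Pre_spread_virous; infer_instance
def pvWitness_spread_virous : List (List Int) := [[2, 0, 1], [0, 0, 0], [1, 0, 0]]

def Spec_spread_virous (data : List (List Int)) (out : Int) : Prop := out = spread_virous_alt data
instance (data : List (List Int)) (out : Int) : Decidable (Spec_spread_virous data out) := by
  unfold Spec_spread_virous; infer_instance

-- ===== CLAIM (what is proved, stated in full; the proofs are below) =====
def Claim_equal_spread_virous : Prop := ∀ (data : List (List Int)), Dom_spread_virous data →
  Pre_spread_virous data → Spec_spread_virous data (spread_virous data)

-- ===== LEMMAS AND PROOFS =====

-- value of the cell p in grid g, as both ports read it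
def Val (g : List (List Int)) (p : Int × Int) : Int := cellA g p.1 p.2

def Region (data : List (List Int)) (p : Int × Int) : Prop :=
  0 ≤ p.1 ∧ p.1 < (data.length : Int) ∧ 0 ≤ p.2 ∧ p.2 < ((data.headD []).length : Int)

def Adj (p q : Int × Int) : Prop :=
  (q.1 = p.1 ∧ (q.2 = p.2 + 1 ∨ q.2 = p.2 - 1)) ∨ (q.2 = p.2 ∧ (q.1 = p.1 + 1 ∨ q.1 = p.1 - 1))

-- X contains the sources and is closed under infection steps
def Closed (data : List (List Int)) (X : Int × Int → Prop) : Prop :=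
  (∀ p, Region data p → Val data p = 2 → X p) ∧
  (∀ p q, X p → Region data q → Val data q = 0 → Adj p q → X q)

def Shape (data g : List (List Int)) : Prop := g.map List.length = data.map List.length

-- g is data with some 0-cells turned into 2 (pointwise, on the region)
def ExtOf (data g : List (List Int)) : Prop :=
  Shape data g ∧ ∀ p, Region data p → Val g p = Val data p ∨ (Val data p = 0 ∧ Val g p = 2)

theorem shape_len {data g : List (List Int)} (hsh : Shape data g) : g.length = data.length := by
  have := congrArg List.length hsh; simpa using this

theorem shape_headD {data g : List (List Int)} (hsh : Shape data g) :
    (g.headD []).length = (data.headD []).length := by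
  unfold Shape at hsh
  cases g with
  | nil => cases data with
    | nil => rfl
    | cons a t => simp at hsh
  | cons r gt =>
    cases data with
    | nil => simp at hsh
    | cons r' dt => simpa using congrArg (fun l => l.headD 0) hsh

theorem val_set {g : List (List Int)} {i j : Nat} (hi : i < g.length) (hj : j < g[i].length)
    (p : Int × Int) (hp1 : 0 ≤ p.1) (hp2 : 0 ≤ p.2) :
    Val (g.set i (g[i].set j 2)) p = if p.1.toNat = i ∧ p.2.toNat = j then 2 else Val g p := by
  unfold Val cellA
  rw [PySem.List.pyGet?_of_nonneg _ hp1, PySem.List.pyGet?_of_nonneg _ hp1]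
  by_cases h1 : p.1.toNat = i
  · subst h1
    rw [List.getElem?_set_self hi, List.getElem?_eq_getElem hi]
    simp only [Option.bind_some]
    rw [PySem.List.pyGet?_of_nonneg _ hp2, PySem.List.pyGet?_of_nonneg _ hp2]
    by_cases h2 : p.2.toNat = j
    · subst h2
      rw [List.getElem?_set_self hj, List.getElem?_eq_getElem hj]
      simp
    · rw [List.getElem?_set_ne (by omega)]
      simp [h2]
  · rw [List.getElem?_set_ne (by omega)]
    simp [h1]

theorem shape_set {data g : List (List Int)} {i j : Nat} (hsh : Shape data g)
    (hi : i < g.length) (_hj : j < g[i].length) :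
    Shape data (g.set i (g[i].set j 2)) := by
  unfold Shape at *
  rw [List.map_set]
  rw [← hsh]
  have : (g[i].set j 2).length = (g.map List.length)[i]'(by simpa using hi) := by
    simp
  rw [this, List.set_getElem_self]

theorem setA_spec {data g : List (List Int)} {t : Int × Int} (hsh : Shape data g)
    (ht : Region data t) (h0 : Val g t = 0) :
    Shape data (setA g t.1 t.2 2) ∧
      ∀ p, 0 ≤ p.1 → 0 ≤ p.2 →
        Val (setA g t.1 t.2 2) p = if p = t then 2 else Val g p := by
  obtain ⟨ht1, _, ht2, _⟩ := ht
  obtain ⟨hi, hj, -, hset⟩ := cellA_zero_elim ht1 ht2 h0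
  rw [hset]
  refine ⟨shape_set hsh hi hj, fun p hp1 hp2 => ?_⟩
  rw [val_set hi hj p hp1 hp2]
  congr 1
  simp only [eq_iff_iff]
  constructor
  · rintro ⟨ha, hb⟩
    exact Prod.ext (by omega) (by omega)
  · rintro rfl
    exact ⟨rfl, rfl⟩

theorem stepA_char (data : List (List Int)) (v d : Int × Int)
    (s : List (List Int) × List (Int × Int)) (hsh : Shape data s.1) :
    (stepA v s d = s ∧ (¬ Region data (v.1 + d.1, v.2 + d.2) ∨ Val s.1 (v.1 + d.1, v.2 + d.2) ≠ 0)) ∨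
    (Region data (v.1 + d.1, v.2 + d.2) ∧ Val s.1 (v.1 + d.1, v.2 + d.2) = 0 ∧
      stepA v s d = (setA s.1 (v.1 + d.1) (v.2 + d.2) 2, s.2 ++ [(v.1 + d.1, v.2 + d.2)])) := by
  have hlen := shape_len hsh
  have hhd := shape_headD hsh
  unfold stepA
  split_ifs with h1 h2
  · refine Or.inl ⟨rfl, Or.inl ?_⟩
    unfold Region
    simp only [not_and_or, not_le, not_lt]
    rcases h1 with h | h | h | h
    · exact Or.inl h
    · exact Or.inr (Or.inr (Or.inl h))
    · exact Or.inr (Or.inl (by omega))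
    · exact Or.inr (Or.inr (Or.inr (by omega)))
  · refine Or.inr ⟨?_, h2, rfl⟩
    rw [not_or, not_or, not_or] at h1
    simp only [not_lt, not_le] at h1
    exact ⟨h1.1, by omega, h1.2.1, by omega⟩
  · exact Or.inl ⟨rfl, Or.inr h2⟩

theorem adj_dirs (v : Int × Int) : ∀ d ∈ dirsA, Adj v (v.1 + d.1, v.2 + d.2) := by
  intro d hd
  unfold dirsA at hd
  unfold Adj
  fin_cases hd <;> simp <;> omega

theorem adj_exists_dir {v q : Int × Int} (h : Adj v q) :
    ∃ d ∈ dirsA, q = (v.1 + d.1, v.2 + d.2) := by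
  unfold Adj at h
  unfold dirsA
  rcases h with ⟨h1, h2 | h2⟩ | ⟨h1, h2 | h2⟩
  · exact ⟨(0, 1), by simp, Prod.ext (by omega) (by omega)⟩
  · exact ⟨(0, -1), by simp, Prod.ext (by omega) (by omega)⟩
  · exact ⟨(1, 0), by simp, Prod.ext (by omega) (by omega)⟩
  · exact ⟨(-1, 0), by simp, Prod.ext (by omega) (by omega)⟩

theorem stepA_inv (data : List (List Int)) (X : Int × Int → Prop) (hX : Closed data X)
    (v d : Int × Int) (hv : X v) (hadj : Adj v (v.1 + d.1, v.2 + d.2))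
    (s : List (List Int) × List (Int × Int))
    (h1 : ExtOf data s.1) (h2 : ∀ q ∈ s.2, X q)
    (h3 : ∀ p, Region data p → Val s.1 p = 2 → X p) :
    ExtOf data (stepA v s d).1 ∧ (∀ q ∈ (stepA v s d).2, X q) ∧
    (∀ p, Region data p → Val (stepA v s d).1 p = 2 → X p) ∧
    (∀ p, Region data p → Val s.1 p ≠ 0 → Val (stepA v s d).1 p ≠ 0) ∧
    (∀ p, Region data p → Val s.1 p = 2 → Val (stepA v s d).1 p = 2) ∧
    (∀ p, Region data p → Val (stepA v s d).1 p = 2 → Val s.1 p = 2 ∨ p ∈ (stepA v s d).2) ∧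
    (∀ q ∈ s.2, q ∈ (stepA v s d).2) ∧
    (Region data (v.1 + d.1, v.2 + d.2) → Val (stepA v s d).1 (v.1 + d.1, v.2 + d.2) ≠ 0) := by
  rcases stepA_char data v d s h1.1 with ⟨heq, hside⟩ | ⟨hreg, h0, heq⟩
  · rw [heq]
    refine ⟨h1, h2, h3, fun p _ hp => hp, fun p _ hp => hp,
      fun p _ hp => Or.inl hp, fun q hq => hq, fun hr => ?_⟩
    rcases hside with hs | hs
    · exact absurd hr hs
    · exact hs
  · obtain ⟨hsh', hchg⟩ := setA_spec h1.1 hreg h0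
    have hdat0 : Val data (v.1 + d.1, v.2 + d.2) = 0 := by
      rcases h1.2 _ hreg with he | he
      · rw [← he]; exact h0
      · exact he.1
    have hXt : X (v.1 + d.1, v.2 + d.2) := hX.2 v _ hv hreg hdat0 hadj
    rw [heq]
    simp only []
    refine ⟨⟨hsh', ?_⟩, ?_, ?_, ?_, ?_, ?_, ?_, ?_⟩
    · intro p hp
      rw [hchg p hp.1 hp.2.2.1]
      split_ifs with hpt
      · subst hpt; exact Or.inr ⟨hdat0, rfl⟩
      · exact h1.2 p hp
    · intro q hq
      rcases List.mem_append.mp hq with hq | hq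
      · exact h2 q hq
      · rw [List.mem_singleton] at hq; subst hq; exact hXt
    · intro p hp hv2
      rw [hchg p hp.1 hp.2.2.1] at hv2
      split_ifs at hv2 with hpt
      · subst hpt; exact hXt
      · exact h3 p hp hv2
    · intro p hp hne
      rw [hchg p hp.1 hp.2.2.1]
      split_ifs with hpt
      · simp
      · exact hne
    · intro p hp h2v
      rw [hchg p hp.1 hp.2.2.1]
      split_ifs with hpt
      · rfl
      · exact h2v
    · intro p hp h2v
      rw [hchg p hp.1 hp.2.2.1] at h2v
      split_ifs at h2v with hpt
      · subst hpt; exact Or.inr (List.mem_append.mpr (Or.inr (List.mem_singleton.mpr rfl)))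
      · exact Or.inl h2v
    · intro q hq; exact List.mem_append.mpr (Or.inl hq)
    · intro hr
      rw [hchg _ hr.1 hr.2.2.1]
      simp

theorem foldA_inv (data : List (List Int)) (X : Int × Int → Prop) (hX : Closed data X)
    (v : Int × Int) (hv : X v) :
    ∀ (ds : List (Int × Int)), (∀ d ∈ ds, Adj v (v.1 + d.1, v.2 + d.2)) →
    ∀ (s : List (List Int) × List (Int × Int)),
      ExtOf data s.1 → (∀ q ∈ s.2, X q) → (∀ p, Region data p → Val s.1 p = 2 → X p) →
      ExtOf data (ds.foldl (stepA v) s).1 ∧ (∀ q ∈ (ds.foldl (stepA v) s).2, X q) ∧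
      (∀ p, Region data p → Val (ds.foldl (stepA v) s).1 p = 2 → X p) ∧
      (∀ p, Region data p → Val s.1 p ≠ 0 → Val (ds.foldl (stepA v) s).1 p ≠ 0) ∧
      (∀ p, Region data p → Val s.1 p = 2 → Val (ds.foldl (stepA v) s).1 p = 2) ∧
      (∀ p, Region data p → Val (ds.foldl (stepA v) s).1 p = 2 →
        Val s.1 p = 2 ∨ p ∈ (ds.foldl (stepA v) s).2) ∧
      (∀ q ∈ s.2, q ∈ (ds.foldl (stepA v) s).2) ∧
      (∀ d ∈ ds, Region data (v.1 + d.1, v.2 + d.2) →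
        Val (ds.foldl (stepA v) s).1 (v.1 + d.1, v.2 + d.2) ≠ 0) := by
  intro ds
  induction ds with
  | nil =>
    intro _ s he hst hr2
    refine ⟨he, hst, hr2, fun p _ hp => hp, fun p _ hp => hp,
      fun p _ hp => Or.inl hp, fun q hq => hq, fun d hd => absurd hd (List.not_mem_nil)⟩
  | cons d ds ih =>
    intro hds s he hst hr2
    obtain ⟨e1, e2, e3, e4, e5, e6, e7, e8⟩ :=
      stepA_inv data X hX v d hv (hds d List.mem_cons_self) s he hst hr2
    obtain ⟨f1, f2, f3, f4, f5, f6, f7, f8⟩ :=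
      ih (fun d' hd' => hds d' (List.mem_cons_of_mem _ hd')) (stepA v s d) e1 e2 e3
    simp only [List.foldl_cons]
    refine ⟨f1, f2, f3, ?_, ?_, ?_, ?_, ?_⟩
    · exact fun p hp hne => f4 p hp (e4 p hp hne)
    · exact fun p hp h2 => f5 p hp (e5 p hp h2)
    · intro p hp h2
      rcases f6 p hp h2 with hm | hm
      · rcases e6 p hp hm with hm' | hm'
        · exact Or.inl hm'
        · exact Or.inr (f7 p hm')
      · exact Or.inr hm
    · exact fun q hq => f7 q (e7 q hq)
    · intro d' hd' hr
      rcases List.mem_cons.mp hd' with rfl | hd'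
      · exact f4 _ hr (e8 hr)
      · exact f8 d' hd' hr

theorem loopA_master (data : List (List Int)) (X : Int × Int → Prop) (hX : Closed data X) :
    ∀ (g : List (List Int)) (st : List (Int × Int)),
      ExtOf data g → (∀ q ∈ st, X q) → (∀ p, Region data p → Val g p = 2 → X p) →
      (∀ p, Region data p → Val g p = 2 → p ∉ st →
        ∀ q, Region data q → Adj p q → Val g q ≠ 0) →
      ExtOf data (loopA g st) ∧ (∀ p, Region data p → Val (loopA g st) p = 2 → X p) ∧
      (∀ p, Region data p → Val (loopA g st) p = 2 →
        ∀ q, Region data q → Adj p q → Val (loopA g st) q ≠ 0) := by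
  intro g st
  induction g, st using loopA.induct with
  | case1 g =>
    intro he _ hr2 hsat
    simp only [loopA]
    exact ⟨he, hr2, fun p hp h2 q hq hadj => hsat p hp h2 (List.not_mem_nil) q hq hadj⟩
  | case2 g p tl ih =>
    intro he hst hr2 hsat
    have hvmem : (p :: tl).getLast (List.cons_ne_nil p tl) ∈ p :: tl := List.getLast_mem _
    have hv : X ((p :: tl).getLast (List.cons_ne_nil p tl)) := hst _ hvmem
    obtain ⟨f1, f2, f3, f4, f5, f6, f7, f8⟩ :=
      foldA_inv data X hX _ hv dirsA (adj_dirs _) (g, (p :: tl).dropLast) he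
        (fun q hq => hst q ((List.dropLast_sublist _).mem hq)) hr2
    have hdecomp : (p :: tl).dropLast ++ [(p :: tl).getLast (List.cons_ne_nil p tl)] = p :: tl :=
      List.dropLast_append_getLast _
    have hsat' : ∀ p', Region data p' →
        Val (List.foldl (stepA ((p :: tl).getLast (List.cons_ne_nil p tl))) (g, (p :: tl).dropLast) dirsA).1 p' = 2 →
        p' ∉ (List.foldl (stepA ((p :: tl).getLast (List.cons_ne_nil p tl))) (g, (p :: tl).dropLast) dirsA).2 →
        ∀ q, Region data q → Adj p' q →
        Val (List.foldl (stepA ((p :: tl).getLast (List.cons_ne_nil p tl))) (g, (p :: tl).dropLast) dirsA).1 q ≠ 0 := by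
      intro p' hp' h2 hnm q hq hadj
      have hold2 : Val g p' = 2 := by
        rcases f6 p' hp' h2 with hm | hm
        · exact hm
        · exact absurd hm hnm
      by_cases hpv : p' = (p :: tl).getLast (List.cons_ne_nil p tl)
      · subst hpv
        obtain ⟨d, hd, rfl⟩ := adj_exists_dir hadj
        exact f8 d hd hq
      · have hnold : p' ∉ p :: tl := by
          intro hmem
          rw [← hdecomp] at hmem
          rcases List.mem_append.mp hmem with hm | hm
          · exact hnm (f7 p' hm)
          · exact hpv (List.mem_singleton.mp hm)
        exact f4 q hq (hsat p' hp' hold2 hnold q hq hadj)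
    show ExtOf data (loopA g (p :: tl)) ∧ _
    rw [loopA]
    exact ih f1 f2 f3 hsat'

theorem adj_rev {p q : Int × Int} (h : Adj p q) :
    p = (q.1 - 1, q.2) ∨ p = (q.1 + 1, q.2) ∨ p = (q.1, q.2 - 1) ∨ p = (q.1, q.2 + 1) := by
  unfold Adj at h
  rcases h with ⟨h1, h2 | h2⟩ | ⟨h1, h2 | h2⟩
  · exact Or.inr (Or.inr (Or.inl (Prod.ext (by omega) (by omega))))
  · exact Or.inr (Or.inr (Or.inr (Prod.ext (by omega) (by omega))))
  · exact Or.inl (Prod.ext (by omega) (by omega))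
  · exact Or.inr (Or.inl (Prod.ext (by omega) (by omega)))

theorem mem_gridCells {h w : Int} {p : Int × Int} :
    p ∈ gridCellsB h w ↔ 0 ≤ p.1 ∧ p.1 < h ∧ 0 ≤ p.2 ∧ p.2 < w := by
  unfold gridCellsB
  rw [List.mem_flatMap]
  constructor
  · rintro ⟨r, hr, hp⟩
    rw [List.mem_map] at hp
    obtain ⟨c, hc, rfl⟩ := hp
    rw [PySem.List.mem_pyRange_one] at hr hc
    exact ⟨hr.1, hr.2, hc.1, hc.2⟩
  · rintro ⟨h1, h2, h3, h4⟩
    refine ⟨p.1, PySem.List.mem_pyRange_one.mpr ⟨h1, h2⟩, ?_⟩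
    rw [List.mem_map]
    exact ⟨p.2, PySem.List.mem_pyRange_one.mpr ⟨h3, h4⟩, rfl⟩

theorem mem_region_gridCells {data : List (List Int)} {p : Int × Int} :
    p ∈ gridCellsB (data.length : Int) ((data.headD []).length : Int) ↔ Region data p := by
  rw [mem_gridCells]; rfl

theorem mem_frontierB {data : List (List Int)} {h w : Int} {inf : PySem.Set (Int × Int)}
    {q : Int × Int} :
    q ∈ frontierB data h w inf ↔
      q ∈ gridCellsB h w ∧ Val data q = 0 ∧ q ∉ inf ∧
        ((q.1 - 1, q.2) ∈ inf ∨ (q.1 + 1, q.2) ∈ inf ∨ (q.1, q.2 - 1) ∈ inf ∨ (q.1, q.2 + 1) ∈ inf) := by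
  unfold frontierB
  rw [PySem.Set.mem_ofList, List.mem_filter]
  simp only [Bool.and_eq_true, Bool.not_eq_true', Bool.or_eq_true, beq_iff_eq,
    PySem.Set.contains_eq_listContains, List.contains_eq_mem, decide_eq_true_eq,
    decide_eq_false_iff_not]
  constructor
  · rintro ⟨hg, ⟨⟨hv, hni⟩, hnb⟩⟩
    exact ⟨hg, hv, hni, by tauto⟩
  · rintro ⟨hg, hv, hni, hnb⟩
    exact ⟨hg, ⟨⟨hv, hni⟩, by tauto⟩⟩

theorem mem_sourcesB {data : List (List Int)} {h w : Int} {q : Int × Int} :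
    q ∈ sourcesB data h w ↔ q ∈ gridCellsB h w ∧ Val data q = 2 := by
  unfold sourcesB
  rw [PySem.Set.mem_ofList, List.mem_filter]
  simp only [beq_iff_eq]
  rfl

theorem loopB_mono (data : List (List Int)) (h w : Int) :
    ∀ (inf : PySem.Set (Int × Int)), ∀ q ∈ inf, q ∈ loopB data h w inf := by
  intro inf
  induction inf using loopB.induct data h w with
  | case1 inf hf =>
    intro q hq
    rw [loopB, dif_pos hf]
    exact hq
  | case2 inf hf ih =>
    intro q hq
    rw [loopB, dif_neg hf]
    exact ih q ((PySem.Set.mem_union _ _ _).mpr (Or.inl hq))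

theorem loopB_fix (data : List (List Int)) (h w : Int) :
    ∀ (inf : PySem.Set (Int × Int)), frontierB data h w (loopB data h w inf) = [] := by
  intro inf
  induction inf using loopB.induct data h w with
  | case1 inf hf => rw [loopB, dif_pos hf]; exact hf
  | case2 inf hf ih => rw [loopB, dif_neg hf]; exact ih

theorem loopB_min (data : List (List Int)) (X : Int × Int → Prop)
    (hcl : ∀ p q, X p → Region data q → Val data q = 0 → Adj p q → X q) :
    ∀ (inf : PySem.Set (Int × Int)), (∀ q ∈ inf, X q) →
      ∀ q ∈ loopB data (data.length : Int) ((data.headD []).length : Int) inf, X q := by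
  intro inf
  induction inf using loopB.induct data (data.length : Int) ((data.headD []).length : Int) with
  | case1 inf hf =>
    intro hinf q hq
    rw [loopB, dif_pos hf] at hq
    exact hinf q hq
  | case2 inf hf ih =>
    intro hinf q hq
    rw [loopB, dif_neg hf] at hq
    refine ih ?_ q hq
    intro x hx
    rcases (PySem.Set.mem_union _ _ _).mp hx with hx | hx
    · exact hinf x hx
    · obtain ⟨hg, hv, hni, hnb⟩ := mem_frontierB.mp hx
      have hreg : Region data x := mem_region_gridCells.mp hg
      rcases hnb with hn | hn | hn | hn
      all_goals {
        refine hcl _ x (hinf _ hn) hreg hv ?_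
        unfold Adj
        first
          | exact Or.inr ⟨rfl, Or.inl (by omega)⟩
          | exact Or.inr ⟨rfl, Or.inr (by omega)⟩
          | exact Or.inl ⟨rfl, Or.inl (by omega)⟩
          | exact Or.inl ⟨rfl, Or.inr (by omega)⟩
      }

theorem sourcesA_eq (data : List (List Int)) :
    sourcesA data = (PySem.List.pyRange 0 (data.length : Int) 1).flatMap (fun r =>
      ((PySem.List.pyRange 0 ((data.headD []).length : Int) 1).filter
        (fun c => decide (cellA data r c = 2))).map (fun c => (r, c))) := by
  unfold sourcesA
  rw [PySem.List.foldl_congr_mem _ _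
    (fun acc r => acc ++ ((PySem.List.pyRange 0 ((data.headD []).length : Int) 1).filter
      (fun c => decide (cellA data r c = 2))).map (fun c => (r, c))) []
    (fun acc r _ => PySem.List.foldl_append_ite (fun c => cellA data r c = 2) (fun c => (r, c)) _ acc)]
  rw [PySem.List.foldl_append_eq_flatMap]
  simp

theorem mem_sourcesA {data : List (List Int)} {p : Int × Int} :
    p ∈ sourcesA data ↔ Region data p ∧ Val data p = 2 := by
  rw [sourcesA_eq, List.mem_flatMap]
  constructor
  · rintro ⟨r, hr, hp⟩
    rw [List.mem_map] at hp
    obtain ⟨c, hc, rfl⟩ := hp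
    rw [List.mem_filter] at hc
    rw [PySem.List.mem_pyRange_one] at hr
    have hc2 := hc.2
    rw [decide_eq_true_eq] at hc2
    rw [PySem.List.mem_pyRange_one] at hc
    exact ⟨⟨hr.1, hr.2, hc.1.1, hc.1.2⟩, hc2⟩
  · rintro ⟨⟨h1, h2, h3, h4⟩, hv⟩
    refine ⟨p.1, PySem.List.mem_pyRange_one.mpr ⟨h1, h2⟩, ?_⟩
    rw [List.mem_map]
    refine ⟨p.2, ?_, rfl⟩
    rw [List.mem_filter, PySem.List.mem_pyRange_one]
    exact ⟨⟨h3, h4⟩, decide_eq_true hv⟩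

theorem countP_flatMap {α β : Type} (l : List α) (f : α → List β) (pr : β → Bool) :
    (l.flatMap f).countP pr = (l.map (fun x => (f x).countP pr)).sum := by
  induction l with
  | nil => rfl
  | cons a t ih => simp [List.countP_append, ih]

theorem cast_sum_map {α : Type} (l : List α) (f : α → Nat) :
    (l.map (fun x => ((f x : Nat) : Int))).sum = (((l.map f).sum : Nat) : Int) := by
  induction l with
  | nil => rfl
  | cons a t ih => simp [ih]

theorem checkSafeA_eq (g : List (List Int)) :
    checkSafeA g = (((gridCellsB (g.length : Int) ((g.headD []).length : Int)).countP
      (fun p => decide (Val g p = 0)) : Nat) : Int) := by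
  unfold checkSafeA
  rw [PySem.List.foldl_congr_mem _ _
    (fun res r => res + (((PySem.List.pyRange 0 ((g.headD []).length : Int) 1).countP
      (fun c => decide (cellA g r c = 0)) : Nat) : Int)) 0
    (fun res r _ => PySem.List.foldl_ite_add_one (fun c => cellA g r c = 0) _ res)]
  rw [PySem.List.foldl_add]
  unfold gridCellsB
  rw [countP_flatMap]
  simp only [List.countP_map]
  rw [cast_sum_map]
  simp
  rfl

theorem wB_eq (data : List (List Int)) :
    (if data = [] then (0 : Int) else ((data.headD []).length : Int)) =
      ((data.headD []).length : Int) := by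
  cases data <;> simp

-- ===== VERDICT (by name: the statement is the Claim_ definition above) =====
theorem spread_virous_spec : Claim_equal_spread_virous := by
  unfold Claim_equal_spread_virous
  intro data _ _
  unfold Spec_spread_virous
  unfold spread_virous spread_virous_alt
  rw [wB_eq data]
  -- abbreviations
  set SB := loopB data (data.length : Int) ((data.headD []).length : Int)
    (sourcesB data (data.length : Int) ((data.headD []).length : Int)) with hSBdef
  set gfin := loopA data (sourcesA data) with hgfin
  -- SB-membership is closed under infection
  have hsrcSB : ∀ p, Region data p → Val data p = 2 → p ∈ SB := by
    intro p hreg hv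
    refine loopB_mono data _ _ _ p (mem_sourcesB.mpr ⟨?_, hv⟩)
    exact mem_region_gridCells.mpr hreg
  have hclosedSB : Closed data (fun p => p ∈ SB) := by
    refine ⟨hsrcSB, ?_⟩
    intro p q hp hq hv hadj
    by_contra hqn
    have hfix := loopB_fix data (data.length : Int) ((data.headD []).length : Int)
      (sourcesB data (data.length : Int) ((data.headD []).length : Int))
    have hqf : q ∈ frontierB data (data.length : Int) ((data.headD []).length : Int) SB := by
      refine mem_frontierB.mpr ⟨mem_region_gridCells.mpr hq, hv, hqn, ?_⟩
      rcases adj_rev hadj with hpe | hpe | hpe | hpe <;> rw [← hpe] <;> tauto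
    rw [← hSBdef] at hfix
    rw [hfix] at hqf
    exact absurd hqf (List.not_mem_nil)
  -- run the A-side master lemma against SB
  obtain ⟨hext, hsound, hsat⟩ := loopA_master data (fun p => p ∈ SB) hclosedSB data
    (sourcesA data)
    ⟨rfl, fun p _ => Or.inl rfl⟩
    (fun q hq => hsrcSB q (mem_sourcesA.mp hq).1 (mem_sourcesA.mp hq).2)
    (fun p hreg hv => hsrcSB p hreg hv)
    (fun p hreg hv hns => absurd (mem_sourcesA.mpr ⟨hreg, hv⟩) hns)
  rw [← hgfin] at hext hsound hsat
  -- the final A-grid is closed, hence contains SB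
  have hclosedSA : Closed data (fun p => Region data p ∧ Val gfin p = 2) := by
    constructor
    · intro p hreg hv
      rcases hext.2 p hreg with he | he
      · exact ⟨hreg, he.trans hv⟩
      · omega
    · rintro p q ⟨hpreg, hp2⟩ hq hv hadj
      have hne := hsat p hpreg hp2 q hq hadj
      rcases hext.2 q hq with he | he
      · omega
      · exact ⟨hq, he.2⟩
  have hSBsub : ∀ q ∈ SB, Region data q ∧ Val gfin q = 2 := by
    refine loopB_min data _ hclosedSA.2 _ ?_
    intro q hq
    obtain ⟨hg, hv⟩ := mem_sourcesB.mp hq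
    exact hclosedSA.1 q (mem_region_gridCells.mp hg) hv
  -- the safe cells of the final grid are exactly the uninfected empty cells
  have hkey : ∀ p, Region data p → (Val gfin p = 0 ↔ (Val data p = 0 ∧ p ∉ SB)) := by
    intro p hreg
    constructor
    · intro h0
      refine ⟨?_, ?_⟩
      · rcases hext.2 p hreg with he | he
        · omega
        · exact he.1
      · intro hmem
        have := (hSBsub p hmem).2
        omega
    · rintro ⟨hv, hns⟩
      rcases hext.2 p hreg with he | he
      · omega
      · exact absurd (hsound p hreg he.2) hns
  -- counting
  rw [checkSafeA_eq]
  have hlen : ((loopA data (sourcesA data)).length : Int) = (data.length : Int) := by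
    rw [← hgfin, shape_len hext.1]
  have hhd : (((loopA data (sourcesA data)).headD []).length : Int) =
      ((data.headD []).length : Int) := by
    rw [← hgfin, shape_headD hext.1]
  rw [hlen, hhd]
  rw [PySem.List.foldl_if_add_one]
  simp only [Int.zero_add]
  congr 1
  apply List.countP_congr
  intro x hx
  have hreg := mem_region_gridCells.mp hx
  have hiff := hkey x hreg
  by_cases h0 : Val gfin x = 0
  · rw [decide_eq_true h0]
    obtain ⟨hv, hns⟩ := hiff.mp h0
    have h1 : (cellB data x == 0) = true := beq_iff_eq.mpr hv
    have h2 : PySem.Set.contains SB x = false := by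
      by_contra hc
      rw [Bool.not_eq_false] at hc
      exact hns ((PySem.Set.contains_iff _ _).mp hc)
    rw [h1, h2]
    rfl
  · rw [decide_eq_false h0]
    by_cases hv : Val data x = 0
    · have hns : x ∈ SB := by
        by_contra hns
        exact h0 (hiff.mpr ⟨hv, hns⟩)
      have h2 : PySem.Set.contains SB x = true := (PySem.Set.contains_iff _ _).mpr hns
      rw [h2]
      simp
    · have h1 : (cellB data x == 0) = false := by
        rw [beq_eq_false_iff_ne]
        exact hv
      rw [h1]
      rfl
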